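-- pv_equiv track=rewrite | github.com/asset311/leetcode | top facebook problems/balancing_element.py | count_balancing_elements
-- ===== SOURCE A (Python) =====
-- def count_balancing_elements(nums) -> int:
--     leftOdd = []
--     leftEven = []
--     odd = even = 0
--
--     # initialize sum of even and odd left of each element, not including that element
--     for i in range(len(nums)):
--         leftOdd.append(odd)
--         leftEven.append(even)
--         if i % 2 == 0:
--             even += nums[i]
--         else:
--             odd += nums[i]
--
--     # initiazlie sum of even and odd right of each element, not including that element
--     even = odd = 0
--     rightOdd = [None]*len(nums)
--     rightEven = [None]*len(nums)
--     for i in reversed(range(len(nums))):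
--         rightOdd[i] = odd
--         rightEven[i] = even
--         if i % 2 == 0:
--             even += nums[i]
--         else:
--             odd += nums[i]
--
--     # element is balancing if sum of odds on the left and evens on the right
--     # are equal to the sum of evens on the left and odds on the right
--     counter = 0
--     for i in range(len(nums)):
--         if(leftOdd[i] + rightEven[i] == leftEven[i] + rightOdd[i]):
--             counter += 1
--
--     return counter
-- ===== SOURCE B (Python) =====
-- def count_balancing_elements(nums) -> int:
--     # one pass for totals, one pass deriving right sums from totals; no stored arrays
--     totalEven = totalOdd = 0
--     for i, v in enumerate(nums):
--         if i % 2 == 0: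
--             totalEven += v
--         else:
--             totalOdd += v
--     count = 0
--     leftEven = leftOdd = 0
--     for i, v in enumerate(nums):
--         if i % 2 == 0:
--             rightEven = totalEven - leftEven - v
--             rightOdd = totalOdd - leftOdd
--         else:
--             rightEven = totalEven - leftEven
--             rightOdd = totalOdd - leftOdd - v
--         if leftOdd + rightEven == leftEven + rightOdd:
--             count += 1
--         if i % 2 == 0:
--             leftEven += v
--         else:
--             leftOdd += v
--     return count
-- ===== Notes on version B (the rewrite author's own statement) =====
-- stated objective: simpler
-- what changed: Replaces A's four stored prefix/suffix parity-sum arrays and three passes by two array-free passes: totals first, then a single pass that derives the right-hand sums as total minus running left sum minus the current element's same-parity contribution.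
import Mathlib
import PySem

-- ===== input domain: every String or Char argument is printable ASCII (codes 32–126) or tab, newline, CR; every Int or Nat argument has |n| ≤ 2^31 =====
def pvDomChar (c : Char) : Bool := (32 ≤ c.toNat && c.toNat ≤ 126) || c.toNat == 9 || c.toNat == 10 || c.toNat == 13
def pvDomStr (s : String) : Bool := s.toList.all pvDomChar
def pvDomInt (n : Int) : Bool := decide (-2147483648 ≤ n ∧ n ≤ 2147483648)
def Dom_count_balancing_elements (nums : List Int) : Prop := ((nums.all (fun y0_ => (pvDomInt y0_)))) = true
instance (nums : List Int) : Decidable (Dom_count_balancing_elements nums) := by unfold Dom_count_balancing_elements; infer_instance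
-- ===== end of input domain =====

-- B replaces A's four stored prefix/suffix parity-sum arrays (three passes) by two array-free
-- passes deriving the right-hand sums from the totals; objective: simpler (O(1) extra space).

-- ===== PORT A =====
-- first loop: build leftOdd/leftEven by appending, accumulate odd/even (nums[i] always in range, so pyGetD 0 is exact)
def aStep1 (nums : List Int) (st : List Int × List Int × Int × Int) (i : Int) :
    List Int × List Int × Int × Int :=
  let (lO, lE, odd, even) := st
  let lO := lO ++ [odd]
  let lE := lE ++ [even]
  if PySem.Int.mod i 2 == 0 then (lO, lE, odd, even + PySem.List.pyGetD nums i 0)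
  else (lO, lE, odd + PySem.List.pyGetD nums i 0, even)

-- second loop: i runs n-1 … 0 and assigns rightOdd[i]/rightEven[i]; consing at the front as i
-- descends builds exactly those arrays (the [None] placeholders are each overwritten, never read)
def aStep2 (nums : List Int) (st : List Int × List Int × Int × Int) (i : Int) :
    List Int × List Int × Int × Int :=
  let (rO, rE, odd, even) := st
  let rO := odd :: rO
  let rE := even :: rE
  if PySem.Int.mod i 2 == 0 then (rO, rE, odd, even + PySem.List.pyGetD nums i 0)
  else (rO, rE, odd + PySem.List.pyGetD nums i 0, even)

def count_balancing_elements (nums : List Int) : Int :=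
  let n := PySem.List.len nums
  let s1 := (PySem.List.pyRange 0 n 1).foldl (aStep1 nums) ([], [], 0, 0)
  let leftOdd := s1.1
  let leftEven := s1.2.1
  let s2 := ((PySem.List.pyRange 0 n 1).reverse).foldl (aStep2 nums) ([], [], 0, 0)
  let rightOdd := s2.1
  let rightEven := s2.2.1
  (PySem.List.pyRange 0 n 1).foldl
    (fun counter i =>
      if PySem.List.pyGetD leftOdd i 0 + PySem.List.pyGetD rightEven i 0 ==
          PySem.List.pyGetD leftEven i 0 + PySem.List.pyGetD rightOdd i 0
      then counter + 1 else counter) 0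

-- ===== PORT B =====
def altTotals (st : Int × Int) (iv : Int × Int) : Int × Int :=
  if PySem.Int.mod iv.1 2 == 0 then (st.1 + iv.2, st.2) else (st.1, st.2 + iv.2)

def altStep (tEven tOdd : Int) (st : Int × Int × Int) (iv : Int × Int) : Int × Int × Int :=
  let (cnt, le, lo) := st
  let (rE, rO) :=
    if PySem.Int.mod iv.1 2 == 0 then (tEven - le - iv.2, tOdd - lo) else (tEven - le, tOdd - lo - iv.2)
  let cnt := if lo + rE == le + rO then cnt + 1 else cnt
  if PySem.Int.mod iv.1 2 == 0 then (cnt, le + iv.2, lo) else (cnt, le, lo + iv.2)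

def count_balancing_elements_alt (nums : List Int) : Int :=
  let t := (PySem.List.enumerate nums 0).foldl altTotals (0, 0)
  let s := (PySem.List.enumerate nums 0).foldl (altStep t.1 t.2) (0, 0, 0)
  s.1

-- ===== PRECONDITION & SPEC =====
def Spec_count_balancing_elements (nums : List Int) (out : Int) : Prop := out = count_balancing_elements_alt nums
instance (nums : List Int) (out : Int) : Decidable (Spec_count_balancing_elements nums out) := by unfold Spec_count_balancing_elements; infer_instance

-- ===== CLAIM (what is proved, stated in full; the proofs are below) =====
def Claim_equal_count_balancing_elements : Prop := ∀ (nums : List Int), Dom_count_balancing_elements nums → Spec_count_balancing_elements nums (count_balancing_elements nums)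

-- ===== LEMMAS AND PROOFS =====

-- sAt p xs: sum of the elements of xs whose alternating flag (starting at p) is true;
-- with p = "this position has even global index" it is the even-indexed sum, flipped the odd one.
def sAt : Bool → List Int → Int
  | _, [] => 0
  | p, v :: xs => (if p then v else 0) + sAt (!p) xs

lemma sAt_append (p : Bool) (ys zs : List Int) :
    sAt p (ys ++ zs) = sAt p ys + sAt (if ys.length % 2 = 0 then p else !p) zs := by
  induction ys generalizing p with
  | nil => simp [sAt]
  | cons v ys ih =>
    rcases Nat.mod_two_eq_zero_or_one ys.length with h2 | h2 <;>
      simp [sAt, ih (!p), h2, Nat.add_mod] <;> ring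

lemma mod_cast_two (s : Nat) : (PySem.Int.mod (s : Int) 2 == 0) = decide (s % 2 = 0) := by
  have h : PySem.Int.mod (s : Int) 2 = ((s % 2 : Nat) : Int) := by
    exact_mod_cast PySem.Int.mod_natCast s 2
  rw [h]
  rcases Nat.mod_two_eq_zero_or_one s with h2 | h2 <;> simp [h2]

lemma parity_succ (s : Nat) : decide ((s + 1) % 2 = 0) = !decide (s % 2 = 0) := by
  rcases Nat.mod_two_eq_zero_or_one s with h2 | h2 <;> simp [Nat.add_mod, h2]

-- pair forms of A's loop bodies (the looked-up value supplied as the second component)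
def pStep1 (st : List Int × List Int × Int × Int) (iv : Int × Int) :
    List Int × List Int × Int × Int :=
  let (lO, lE, odd, even) := st
  let lO := lO ++ [odd]
  let lE := lE ++ [even]
  if PySem.Int.mod iv.1 2 == 0 then (lO, lE, odd, even + iv.2)
  else (lO, lE, odd + iv.2, even)

def pStep2 (st : List Int × List Int × Int × Int) (iv : Int × Int) :
    List Int × List Int × Int × Int :=
  let (rO, rE, odd, even) := st
  let rO := odd :: rO
  let rE := even :: rE
  if PySem.Int.mod iv.1 2 == 0 then (rO, rE, odd, even + iv.2)
  else (rO, rE, odd + iv.2, even)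

-- one step of the forward fill, as an equality of the produced prefix arrays
lemma llist (q : Bool) (v b a : Int) (xs : List Int) (pre : List Int)
    (hb : b = a + (if q then v else 0)) :
    (pre ++ [a]) ++ (List.range xs.length).map (fun k => b + sAt (!q) (xs.take k))
      = pre ++ (List.range (xs.length + 1)).map (fun k => a + sAt q ((v :: xs).take k)) := by
  rw [List.range_succ_eq_map, List.map_cons, List.map_map, List.append_assoc, List.singleton_append]
  congr 1
  simp [sAt]
  intro k hk
  cases q <;> simp [hb] <;> ring

lemma loop1_char (xs : List Int) (s : Nat) (lO lE : List Int) (o e : Int) :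
    (PySem.List.enumerate xs (s : Int)).foldl pStep1 (lO, lE, o, e) =
      (lO ++ (List.range xs.length).map (fun k => o + sAt (!decide (s % 2 = 0)) (xs.take k)),
       lE ++ (List.range xs.length).map (fun k => e + sAt (decide (s % 2 = 0)) (xs.take k)),
       o + sAt (!decide (s % 2 = 0)) xs,
       e + sAt (decide (s % 2 = 0)) xs) := by
  induction xs generalizing s lO lE o e with
  | nil => simp [sAt]
  | cons v xs ih =>
    rw [PySem.List.enumerate_cons]
    have hcast : (s : Int) + 1 = ((s + 1 : Nat) : Int) := by push_cast; ring
    rw [List.foldl_cons, hcast]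
    have hb : pStep1 (lO, lE, o, e) ((s : Int), v) =
        if decide (s % 2 = 0) then (lO ++ [o], lE ++ [e], o, e + v)
        else (lO ++ [o], lE ++ [e], o + v, e) := by
      simp only [pStep1]
      rw [mod_cast_two]
    rw [hb]
    by_cases hp : s % 2 = 0
    · simp only [hp, decide_true, if_true, ih, parity_succ, Bool.not_true, Bool.not_false,
        Prod.mk.injEq, List.length_cons]
      exact ⟨llist false v o o xs lO (by simp), llist true v (e + v) e xs lE (by simp),
        by simp [sAt], by simp [sAt] <;> ring⟩
    · simp only [hp, decide_false, if_false, ih, parity_succ, Bool.not_true, Bool.not_false,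
        Prod.mk.injEq, List.length_cons]
      exact ⟨llist true v (o + v) o xs lO (by simp), llist false v e e xs lE (by simp),
        by simp [sAt] <;> ring, by simp [sAt]⟩

-- one step of the backwards fill, as an equality of the produced arrays
lemma rlist (q : Bool) (ys : List Int) (x a b c : Int) (tail : List Int)
    (hc : sAt q (ys ++ [x]) = sAt q ys + c) (hb : b = a + c) :
    List.map (fun k => b + (sAt q ys - sAt q (ys.take (k + 1)))) (List.range ys.length) ++ a :: tail
      = List.map (fun k => a + (sAt q (ys ++ [x]) - sAt q ((ys ++ [x]).take (k + 1))))
          (List.range (ys.length + 1)) ++ tail := by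
  rw [List.range_succ, List.map_append, List.map_cons, List.map_nil, List.append_assoc]
  congr 1
  · apply List.map_congr_left
    intro k hk
    have hk' : k + 1 ≤ ys.length := List.mem_range.mp hk
    rw [List.take_append_of_le_length hk', hc, hb]
    ring
  · rw [List.singleton_append]
    congr 1
    rw [List.take_of_length_le (by simp)]
    ring

lemma loop2_char (xs : List Int) (rO rE : List Int) (o e : Int) :
    ((PySem.List.enumerate xs 0).reverse).foldl pStep2 (rO, rE, o, e) =
      ((List.range xs.length).map (fun k => o + (sAt false xs - sAt false (xs.take (k + 1)))) ++ rO,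
       (List.range xs.length).map (fun k => e + (sAt true xs - sAt true (xs.take (k + 1)))) ++ rE,
       o + sAt false xs, e + sAt true xs) := by
  induction xs using List.reverseRecOn generalizing rO rE o e with
  | nil => simp [sAt]
  | append_singleton ys x ih =>
    rw [PySem.List.enumerate_append, List.reverse_append, List.foldl_append]
    have h1 : PySem.List.enumerate [x] ((0 : Int) + (ys.length : Int)) = [((ys.length : Int), x)] := by
      simp [PySem.List.enumerate_cons, PySem.List.enumerate_nil]
    rw [h1]
    have hb : pStep2 (rO, rE, o, e) ((ys.length : Int), x) =
        if decide (ys.length % 2 = 0) then (o :: rO, e :: rE, o, e + x)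
        else (o :: rO, e :: rE, o + x, e) := by
      simp only [pStep2]
      rw [mod_cast_two]
    simp only [List.reverse_cons, List.reverse_nil, List.nil_append, List.foldl_cons,
      List.foldl_nil, hb, List.length_append, List.length_cons, List.length_nil]
    have hcF : sAt false (ys ++ [x]) = sAt false ys + (if ys.length % 2 = 0 then 0 else x) := by
      rw [sAt_append]; rcases Nat.mod_two_eq_zero_or_one ys.length with h2 | h2 <;> simp [h2, sAt]
    have hcT : sAt true (ys ++ [x]) = sAt true ys + (if ys.length % 2 = 0 then x else 0) := by
      rw [sAt_append]; rcases Nat.mod_two_eq_zero_or_one ys.length with h2 | h2 <;> simp [h2, sAt]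
    by_cases hp : ys.length % 2 = 0
    · simp only [hp, decide_true, if_true, ih, Prod.mk.injEq] at hcF hcT ⊢
      refine ⟨rlist false ys x o o 0 rO hcF (by ring),
              rlist true ys x e (e + x) x rE hcT (by ring), ?_, ?_⟩
      · simp [hcF] <;> ring
      · simp [hcT] <;> ring
    · simp only [hp, decide_false, Bool.false_eq_true, if_false, ih, Prod.mk.injEq] at hcF hcT ⊢
      refine ⟨rlist false ys x o (o + x) x rO hcF (by ring),
              rlist true ys x e e 0 rE hcT (by ring), ?_, ?_⟩
      · simp [hcF] <;> ring
      · simp [hcT] <;> ring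

-- reference recursion: parity flag of the current element, left odd/even sums so far
def refCount : Bool → Int → Int → List Int → Int
  | _, _, _, [] => 0
  | p, lo, le, v :: xs =>
    (if lo + sAt (!p) xs == le + sAt p xs then 1 else 0) +
      refCount (!p) (if p then lo else lo + v) (if p then le + v else le) xs

lemma countP_shift (f g : Nat → Bool) (n : Nat) (hs : ∀ k, f (k + 1) = g k) :
    List.countP f (List.range (n + 1)) = (if f 0 then 1 else 0) + List.countP g (List.range n) := by
  rw [List.range_succ_eq_map, List.countP_cons, List.countP_map]
  have h : List.countP (f ∘ Nat.succ) (List.range n) = List.countP g (List.range n) :=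
    List.countP_congr (fun k _ => by simpa [Function.comp] using hs k)
  rw [h]
  cases hf : f 0 <;> simp [hf] <;> omega

lemma refCount_char (xs : List Int) (p : Bool) (lo le : Int) :
    refCount p lo le xs =
      ((List.range xs.length).countP (fun k =>
        lo + sAt (!p) (xs.take k) + (sAt p xs - sAt p (xs.take (k + 1))) ==
          le + sAt p (xs.take k) + (sAt (!p) xs - sAt (!p) (xs.take (k + 1)))) : Int) := by
  induction xs generalizing p lo le with
  | nil => simp [refCount]
  | cons v xs ih =>
    rw [refCount, ih, List.length_cons]
    rw [countP_shift
      (fun k =>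
        lo + sAt (!p) ((v :: xs).take k) + (sAt p (v :: xs) - sAt p ((v :: xs).take (k + 1))) ==
          le + sAt p ((v :: xs).take k) + (sAt (!p) (v :: xs) - sAt (!p) ((v :: xs).take (k + 1))))
      (fun k =>
        (if p then lo else lo + v) + sAt (!!p) (xs.take k) + (sAt (!p) xs - sAt (!p) (xs.take (k + 1))) ==
          (if p then le + v else le) + sAt (!p) (xs.take k) + (sAt (!!p) xs - sAt (!!p) (xs.take (k + 1))))
      xs.length
      (fun k => by cases p <;> simp [sAt] <;> congr 1 <;> ring)]
    have h0 : (lo + sAt (!p) ((v :: xs).take 0) + (sAt p (v :: xs) - sAt p ((v :: xs).take (0 + 1))) ==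
        le + sAt p ((v :: xs).take 0) + (sAt (!p) (v :: xs) - sAt (!p) ((v :: xs).take (0 + 1)))) =
        (lo + sAt (!p) xs == le + sAt p xs) := by
      cases p <;> simp [sAt] <;> congr 1 <;> ring
    rw [h0]
    push_cast
    by_cases hq : lo + sAt (!p) xs = le + sAt p xs <;> simp [hq] <;> first | ring | omega

lemma totals_char (xs : List Int) (s : Nat) (tE tO : Int) :
    (PySem.List.enumerate xs (s : Int)).foldl altTotals (tE, tO) =
      (tE + sAt (decide (s % 2 = 0)) xs, tO + sAt (!decide (s % 2 = 0)) xs) := by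
  induction xs generalizing s tE tO with
  | nil => simp [sAt]
  | cons v xs ih =>
    rw [PySem.List.enumerate_cons]
    have hcast : (s : Int) + 1 = ((s + 1 : Nat) : Int) := by push_cast; ring
    rw [List.foldl_cons, hcast]
    have hb : altTotals (tE, tO) ((s : Int), v) =
        if decide (s % 2 = 0) then (tE + v, tO) else (tE, tO + v) := by
      simp only [altTotals]
      rw [mod_cast_two]
    rw [hb]
    by_cases hp : s % 2 = 0 <;>
      simp only [hp, decide_true, decide_false, if_true, if_false, ih, parity_succ,
        Bool.not_true, Bool.not_false, Bool.not_not, Prod.mk.injEq] <;>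
      constructor <;> simp [sAt, hp] <;> ring

lemma altLoop_char (xs : List Int) (s : Nat) (cnt le lo tEven tOdd : Int)
    (hte : tEven = le + sAt (decide (s % 2 = 0)) xs)
    (hto : tOdd = lo + sAt (!decide (s % 2 = 0)) xs) :
    (PySem.List.enumerate xs (s : Int)).foldl (altStep tEven tOdd) (cnt, le, lo) =
      (cnt + refCount (decide (s % 2 = 0)) lo le xs,
       le + sAt (decide (s % 2 = 0)) xs, lo + sAt (!decide (s % 2 = 0)) xs) := by
  induction xs generalizing s cnt le lo with
  | nil => simp [sAt, refCount]
  | cons v xs ih =>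
    rw [PySem.List.enumerate_cons]
    have hcast : (s : Int) + 1 = ((s + 1 : Nat) : Int) := by push_cast; ring
    rw [List.foldl_cons, hcast]
    by_cases hp : s % 2 = 0
    · have hb : altStep tEven tOdd (cnt, le, lo) ((s : Int), v) =
          ((if lo + (tEven - le - v) == le + (tOdd - lo) then cnt + 1 else cnt), le + v, lo) := by
        simp only [altStep]
        rw [mod_cast_two]
        simp [hp]
      rw [hb, ih (s + 1) _ (le + v) lo
          (by rw [parity_succ]; simp [hp] at hte ⊢; rw [hte]; simp [sAt, hp]; ring)
          (by rw [parity_succ]; simp [hp] at hto ⊢; rw [hto]; simp [sAt, hp])]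
      simp only [parity_succ, hp, decide_true, Bool.not_true, Bool.not_false, Prod.mk.injEq]
      refine ⟨?_, by simp [sAt] ; ring, by simp [sAt]⟩
      rw [refCount]
      have hcond : (lo + (tEven - le - v) == le + (tOdd - lo)) = (lo + sAt false xs == le + sAt true xs) := by
        simp [hp] at hte hto
        rw [hte, hto]
        congr 1 <;> simp [sAt] <;> ring
      rw [hcond]
      by_cases hq : lo + sAt false xs = le + sAt true xs <;> simp [hq] <;> ring
    · have hb : altStep tEven tOdd (cnt, le, lo) ((s : Int), v) =
          ((if lo + (tEven - le) == le + (tOdd - lo - v) then cnt + 1 else cnt), le, lo + v) := by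
        simp only [altStep]
        rw [mod_cast_two]
        simp [hp]
      rw [hb, ih (s + 1) _ le (lo + v)
          (by rw [parity_succ]; simp [hp] at hte ⊢; rw [hte]; simp [sAt, hp])
          (by rw [parity_succ]; simp [hp] at hto ⊢; rw [hto]; simp [sAt, hp]; ring)]
      simp only [parity_succ, hp, decide_false, Bool.not_true, Bool.not_false, Prod.mk.injEq]
      refine ⟨?_, by simp [sAt], by simp [sAt] ; ring⟩
      rw [refCount]
      have hcond : (lo + (tEven - le) == le + (tOdd - lo - v)) = (lo + sAt true xs == le + sAt false xs) := by
        simp [hp] at hte hto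
        rw [hte, hto]
        congr 1 <;> simp [sAt] <;> ring
      rw [hcond]
      by_cases hq : lo + sAt true xs = le + sAt false xs <;> simp [hq] <;> ring

-- ===== VERDICT (by name: the statement is the Claim_ definition above) =====
theorem count_balancing_elements_spec : Claim_equal_count_balancing_elements := by
  unfold Claim_equal_count_balancing_elements
  intro nums _
  unfold Spec_count_balancing_elements
  -- B side
  have hBtot : (PySem.List.enumerate nums 0).foldl altTotals (0, 0) =
      (sAt true nums, sAt false nums) := by
    simpa using totals_char nums 0 0 0
  have hBloop : (PySem.List.enumerate nums 0).foldl (altStep (sAt true nums) (sAt false nums)) (0, 0, 0) =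
      (refCount true 0 0 nums, sAt true nums, sAt false nums) := by
    simpa using altLoop_char nums 0 0 0 0 (sAt true nums) (sAt false nums) (by simp) (by simp)
  have hB : count_balancing_elements_alt nums = refCount true 0 0 nums := by
    simp [count_balancing_elements_alt, hBtot, hBloop]
  -- A side
  have e1 : (PySem.List.pyRange 0 (PySem.List.len nums) 1).foldl (aStep1 nums) ([], [], 0, 0)
      = (PySem.List.enumerate nums 0).foldl pStep1 ([], [], 0, 0) := by
    rw [PySem.List.enumerate_eq_map_pyRange nums 0, List.foldl_map]
    rfl
  have e2 : ((PySem.List.pyRange 0 (PySem.List.len nums) 1).reverse).foldl (aStep2 nums) ([], [], 0, 0)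
      = ((PySem.List.enumerate nums 0).reverse).foldl pStep2 ([], [], 0, 0) := by
    rw [PySem.List.enumerate_eq_map_pyRange nums 0, ← List.map_reverse, List.foldl_map]
    rfl
  have h1 : (PySem.List.enumerate nums 0).foldl pStep1 ([], [], 0, 0) =
      ((List.range nums.length).map (fun k => sAt false (nums.take k)),
       (List.range nums.length).map (fun k => sAt true (nums.take k)),
       sAt false nums, sAt true nums) := by
    simpa using loop1_char nums 0 [] [] 0 0
  have h2 : ((PySem.List.enumerate nums 0).reverse).foldl pStep2 ([], [], 0, 0) =
      ((List.range nums.length).map (fun k => sAt false nums - sAt false (nums.take (k + 1))),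
       (List.range nums.length).map (fun k => sAt true nums - sAt true (nums.take (k + 1))),
       sAt false nums, sAt true nums) := by
    simpa using loop2_char nums [] [] 0 0
  have hget : ∀ (f : Nat → Int) (k : Nat), k < nums.length →
      ((List.range nums.length).map f).getD k 0 = f k := by
    intro f k hk
    rw [List.getD_eq_getElem?_getD, List.getElem?_map, List.getElem?_range hk]
    rfl
  have hA : count_balancing_elements nums =
      ((List.range nums.length).countP (fun k =>
        sAt false (nums.take k) + (sAt true nums - sAt true (nums.take (k + 1))) ==
          sAt true (nums.take k) + (sAt false nums - sAt false (nums.take (k + 1)))) : Int) := by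
    simp only [count_balancing_elements, e1, h1, e2, h2]
    rw [PySem.List.len_eq, PySem.List.pyRange_zero_nat, List.foldl_map]
    rw [PySem.List.foldl_congr_mem _ _
      (fun (counter : Int) (k : Nat) =>
        if sAt false (nums.take k) + (sAt true nums - sAt true (nums.take (k + 1))) ==
            sAt true (nums.take k) + (sAt false nums - sAt false (nums.take (k + 1)))
        then counter + 1 else counter) _
      (by
        intro c k hk
        have hk' := List.mem_range.mp hk
        rw [PySem.List.pyGetD_natCast, PySem.List.pyGetD_natCast, PySem.List.pyGetD_natCast,
          PySem.List.pyGetD_natCast, hget _ _ hk', hget _ _ hk', hget _ _ hk', hget _ _ hk'])]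
    rw [PySem.List.foldl_if_add_one]
    simp
  rw [hA, hB, refCount_char]
  refine Int.natCast_inj.mpr (List.countP_congr ?_)
  intro k _
  simp only [Bool.not_true, zero_add]
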